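-- pv_equiv track=rewrite | github.com/soyukke/lean-unsolved | scripts/v2_shift_space_analysis.py | v2_orbit
-- ===== SOURCE A (Python) =====
-- def collatz_v2(n):
--     """Return v2(3n+1) for odd n"""
--     m = 3 * n + 1
--     v = 0
--     while m % 2 == 0:
--         m //= 2
--         v += 1
--     return v
--
-- def syracuse(n):
--     """Syracuse map: T(n) = (3n+1)/2^v2(3n+1) for odd n"""
--     m = 3 * n + 1
--     while m % 2 == 0:
--         m //= 2
--     return m
--
-- def v2_orbit(n, max_steps=1000):
--     """Return the v2 sequence of n's orbit until reaching 1"""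
--     seq = []
--     curr = n
--     for _ in range(max_steps):
--         if curr == 1:
--             break
--         if curr % 2 == 0:
--             while curr % 2 == 0:
--                 curr //= 2
--             if curr == 1:
--                 break
--         v = collatz_v2(curr)
--         seq.append(v)
--         curr = syracuse(curr)
--     return seq
-- ===== SOURCE B (Python) =====
-- def v2_orbit(n, max_steps=1000):
--     """Return the v2 sequence of n's orbit until reaching 1"""
--     seq = []
--     budget = max_steps
--     curr = n
--     run = -1  # -1: initial even-reduction phase, no 3n+1 step pending
--     while True:
--         if curr % 2 == 0:
--             curr //= 2
--             if run >= 0: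
--                 run += 1
--         else:
--             if run >= 0:
--                 seq.append(run)
--             if curr == 1 or budget <= 0:
--                 break
--             budget -= 1
--             curr = 3 * curr + 1
--             run = 0
--     return seq
-- ===== Notes on version B (the rewrite author's own statement) =====
-- stated objective: alternative
-- what changed: B replaces A's nested structure (an outer for-loop over Syracuse steps calling two helpers, each with its own halving loop) by one flat while-loop over the raw Collatz micro-steps that run-length-encodes the halving runs: a single state (curr, run, budget) halves or applies 3n+1 one micro-step at a time and emits the pending run length whenever the next odd value is reached.
-- outside the precondition, e.g. on v2_orbit(0, 0): A returns [], B does not finish within the time limit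
import Mathlib
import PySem

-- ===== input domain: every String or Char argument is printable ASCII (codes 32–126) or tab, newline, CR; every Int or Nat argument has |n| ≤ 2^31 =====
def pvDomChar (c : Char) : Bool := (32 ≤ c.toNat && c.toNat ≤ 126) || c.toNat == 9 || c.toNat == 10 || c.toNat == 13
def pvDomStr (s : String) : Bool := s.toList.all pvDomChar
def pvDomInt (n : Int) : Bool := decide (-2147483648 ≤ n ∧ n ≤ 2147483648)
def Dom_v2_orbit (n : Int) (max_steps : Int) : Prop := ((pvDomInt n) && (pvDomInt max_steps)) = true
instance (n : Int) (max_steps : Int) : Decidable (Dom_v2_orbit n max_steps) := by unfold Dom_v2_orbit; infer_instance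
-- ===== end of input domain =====

-- B replaces A's nested loops (outer Syracuse steps, inner halving loops in two helpers) by one
-- flat loop over the raw Collatz micro-steps that run-length-encodes the halving runs
-- (objective: alternative). Pre_ excludes only n = 0, where B loops forever (and A does too unless max_steps <= 0).

-- ===== PORT A =====
-- 'while m % 2 == 0: m //= 2; v += 1' of collatz_v2
def collatzV2Go (fuel : Nat) (m : Int) (v : Int) : Int :=
  match fuel with
  | 0 => v
  | fuel + 1 =>
    if PySem.Int.mod m 2 = 0 then collatzV2Go fuel (PySem.Int.floordiv m 2) (v + 1) else v

def collatz_v2 (n : Int) : Int := collatzV2Go (3 * n + 1).natAbs (3 * n + 1) 0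

-- 'while m % 2 == 0: m //= 2' (the same loop text appears in syracuse and in v2_orbit's even branch)
def stripGoA (fuel : Nat) (m : Int) : Int :=
  match fuel with
  | 0 => m
  | fuel + 1 =>
    if PySem.Int.mod m 2 = 0 then stripGoA fuel (PySem.Int.floordiv m 2) else m

def syracuse (n : Int) : Int := stripGoA (3 * n + 1).natAbs (3 * n + 1)

-- 'for _ in range(max_steps)' with its two breaks, state (seq, curr)
def v2OrbitGo (fuel : Nat) (seq : List Int) (curr : Int) : List Int :=
  match fuel with
  | 0 => seq
  | fuel + 1 =>
    if curr = 1 then seq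
    else if PySem.Int.mod curr 2 = 0 then
      let c := stripGoA curr.natAbs curr
      if c = 1 then seq
      else v2OrbitGo fuel (seq ++ [collatz_v2 c]) (syracuse c)
    else v2OrbitGo fuel (seq ++ [collatz_v2 curr]) (syracuse curr)

def v2_orbit (n : Int) (max_steps : Int) : List Int := v2OrbitGo max_steps.toNat [] n

-- ===== PORT B =====
-- B's single 'while True' loop over raw Collatz micro-steps, state (budget, curr, run, seq);
-- the 'curr = 0' guard only makes the recursion total: the Python loops forever there (outside Pre_).
def v2AltGo (budget : Int) (curr : Int) (run : Int) (seq : List Int) : List Int :=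
  if _h0 : curr = 0 then seq
  else if _h1 : PySem.Int.mod curr 2 = 0 then
    v2AltGo budget (PySem.Int.floordiv curr 2) (if run ≥ 0 then run + 1 else run) seq
  else
    let seq' := if run ≥ 0 then seq ++ [run] else seq
    if _h2 : curr = 1 ∨ budget ≤ 0 then seq'
    else v2AltGo (budget - 1) (3 * curr + 1) 0 seq'
termination_by (budget.toNat, curr.natAbs)
decreasing_by
  · apply Prod.Lex.right
    rw [PySem.Int.floordiv_eq_ediv_of_pos (by norm_num)]
    rw [PySem.Int.mod_eq_emod_of_pos (by norm_num)] at _h1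
    omega
  · apply Prod.Lex.left
    omega

def v2_orbit_alt (n : Int) (max_steps : Int) : List Int := v2AltGo max_steps n (-1) []

-- ===== PRECONDITION & SPEC =====
-- Pre_ excludes exactly n = 0: B's flat loop halves 0 forever, and A too loops forever there
-- whenever max_steps > 0 (only for max_steps <= 0 does A still return [], which B does not reach).
def Pre_v2_orbit (n : Int) (max_steps : Int) : Prop := n ≠ 0
instance (n : Int) (max_steps : Int) : Decidable (Pre_v2_orbit n max_steps) := by unfold Pre_v2_orbit; infer_instance
def pvWitness_v2_orbit : Int × Int := (7, 5)

def Spec_v2_orbit (n : Int) (max_steps : Int) (out : List Int) : Prop := out = v2_orbit_alt n max_steps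
instance (n : Int) (max_steps : Int) (out : List Int) : Decidable (Spec_v2_orbit n max_steps out) := by unfold Spec_v2_orbit; infer_instance

-- ===== CLAIM (what is proved, stated in full; the proofs are below) =====
def Claim_equal_v2_orbit : Prop := ∀ (n : Int) (max_steps : Int), Dom_v2_orbit n max_steps → Pre_v2_orbit n max_steps → Spec_v2_orbit n max_steps (v2_orbit n max_steps)

-- ===== LEMMAS AND PROOFS =====

theorem mod2_emod (m : Int) : PySem.Int.mod m 2 = m % 2 :=
  PySem.Int.mod_eq_emod_of_pos (by norm_num)

theorem fdiv2_ediv (m : Int) : PySem.Int.floordiv m 2 = m / 2 :=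
  PySem.Int.floordiv_eq_ediv_of_pos (by norm_num)

theorem half_lt (m : Int) (h : m ≠ 0) (he : PySem.Int.mod m 2 = 0) :
    (PySem.Int.floordiv m 2).natAbs < m.natAbs := by
  rw [fdiv2_ediv]; rw [mod2_emod] at he; omega

theorem half_ne (m : Int) (h : m ≠ 0) (he : PySem.Int.mod m 2 = 0) :
    PySem.Int.floordiv m 2 ≠ 0 := by
  rw [fdiv2_ediv]; rw [mod2_emod] at he; omega

-- fuel irrelevance for A's halving loops
theorem stripA_fuel (k : Nat) : ∀ (m : Int) (f : Nat), m ≠ 0 → m.natAbs ≤ f → m.natAbs ≤ k →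
    stripGoA f m = stripGoA m.natAbs m := by
  induction k with
  | zero => intro m f h hf hk; omega
  | succ k ih =>
    intro m f h hf hk
    obtain ⟨f', rfl⟩ : ∃ f', f = f' + 1 := ⟨f - 1, by omega⟩
    obtain ⟨j, hj⟩ : ∃ j, m.natAbs = j + 1 := ⟨m.natAbs - 1, by omega⟩
    rw [hj, stripGoA, stripGoA]
    by_cases he : PySem.Int.mod m 2 = 0
    · rw [if_pos he, if_pos he]
      have h2 := half_ne m h he
      have hlt := half_lt m h he
      rw [ih _ f' h2 (by omega) (by omega), ih _ j h2 (by omega) (by omega)]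
    · rw [if_neg he, if_neg he]

theorem cntA_fuel (k : Nat) : ∀ (m : Int) (f : Nat) (v : Int), m ≠ 0 → m.natAbs ≤ f → m.natAbs ≤ k →
    collatzV2Go f m v = collatzV2Go m.natAbs m v := by
  induction k with
  | zero => intro m f v h hf hk; omega
  | succ k ih =>
    intro m f v h hf hk
    obtain ⟨f', rfl⟩ : ∃ f', f = f' + 1 := ⟨f - 1, by omega⟩
    obtain ⟨j, hj⟩ : ∃ j, m.natAbs = j + 1 := ⟨m.natAbs - 1, by omega⟩
    rw [hj, collatzV2Go, collatzV2Go]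
    by_cases he : PySem.Int.mod m 2 = 0
    · rw [if_pos he, if_pos he]
      have h2 := half_ne m h he
      have hlt := half_lt m h he
      rw [ih _ f' _ h2 (by omega) (by omega), ih _ j _ h2 (by omega) (by omega)]
    · rw [if_neg he, if_neg he]

-- the result of A's halving loop is odd (and nonzero)
theorem stripA_odd (k : Nat) : ∀ (m : Int), m ≠ 0 → m.natAbs ≤ k →
    PySem.Int.mod (stripGoA m.natAbs m) 2 ≠ 0 ∧ stripGoA m.natAbs m ≠ 0 := by
  induction k with
  | zero => intro m h hk; omega
  | succ k ih =>
    intro m h hk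
    obtain ⟨j, hj⟩ : ∃ j, m.natAbs = j + 1 := ⟨m.natAbs - 1, by omega⟩
    rw [hj, stripGoA]
    by_cases he : PySem.Int.mod m 2 = 0
    · rw [if_pos he]
      have h2 := half_ne m h he
      have hlt := half_lt m h he
      rw [stripA_fuel k _ _ h2 (by omega) (by omega)]
      exact ih _ h2 (by omega)
    · rw [if_neg he]; exact ⟨he, h⟩

theorem cnt_nonneg (f : Nat) : ∀ (m v : Int), 0 ≤ v → 0 ≤ collatzV2Go f m v := by
  induction f with
  | zero => intro m v hv; simpa [collatzV2Go] using hv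
  | succ f ih =>
    intro m v hv
    rw [collatzV2Go]
    split_ifs with he
    · exact ih _ _ (by omega)
    · exact hv

-- unfolding B at an odd point, run = -1 (no pending append)
theorem alt_odd_neg (b m : Int) (seq : List Int) (ho : PySem.Int.mod m 2 ≠ 0) :
    v2AltGo b m (-1) seq = if m = 1 ∨ b ≤ 0 then seq else v2AltGo (b - 1) (3 * m + 1) 0 seq := by
  have hm : m ≠ 0 := by intro h; apply ho; rw [h, mod2_emod]; rfl
  rw [v2AltGo]
  simp only [dif_neg hm, dif_neg ho, dite_eq_ite]
  norm_num

-- unfolding B at an odd point, 0 ≤ run (pending append)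
theorem alt_odd_pos (b m r : Int) (seq : List Int) (ho : PySem.Int.mod m 2 ≠ 0) (hr : 0 ≤ r) :
    v2AltGo b m r seq = if m = 1 ∨ b ≤ 0 then seq ++ [r] else v2AltGo (b - 1) (3 * m + 1) 0 (seq ++ [r]) := by
  have hm : m ≠ 0 := by intro h; apply ho; rw [h, mod2_emod]; rfl
  rw [v2AltGo]
  have hrT : (r ≥ 0) = True := by simp [ge_iff_le, hr]
  simp only [dif_neg hm, dif_neg ho, dite_eq_ite, hrT, if_true]

-- B's halving run with run = -1 strips without counting
theorem alt_strip_neg (k : Nat) : ∀ (m b : Int) (seq : List Int), m ≠ 0 → m.natAbs ≤ k →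
    v2AltGo b m (-1) seq = v2AltGo b (stripGoA m.natAbs m) (-1) seq := by
  induction k with
  | zero => intro m b seq h hk; omega
  | succ k ih =>
    intro m b seq h hk
    obtain ⟨j, hj⟩ : ∃ j, m.natAbs = j + 1 := ⟨m.natAbs - 1, by omega⟩
    by_cases he : PySem.Int.mod m 2 = 0
    · have h2 := half_ne m h he
      have hlt := half_lt m h he
      rw [hj, stripGoA, if_pos he, stripA_fuel k _ _ h2 (by omega) (by omega)]
      rw [v2AltGo, dif_neg h, dif_pos he]
      have hneg : ¬((-1:Int) ≥ 0) := by norm_num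
      rw [if_neg hneg]
      exact ih _ _ _ h2 (by omega)
    · rw [hj, stripGoA, if_neg he]

-- B's halving run with 0 ≤ run strips and counts (the fused pass)
theorem alt_strip_pos (k : Nat) : ∀ (m b r : Int) (seq : List Int), m ≠ 0 → m.natAbs ≤ k → 0 ≤ r →
    v2AltGo b m r seq = v2AltGo b (stripGoA m.natAbs m) (collatzV2Go m.natAbs m r) seq := by
  induction k with
  | zero => intro m b r seq h hk; omega
  | succ k ih =>
    intro m b r seq h hk hr
    obtain ⟨j, hj⟩ : ∃ j, m.natAbs = j + 1 := ⟨m.natAbs - 1, by omega⟩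
    by_cases he : PySem.Int.mod m 2 = 0
    · have h2 := half_ne m h he
      have hlt := half_lt m h he
      rw [hj, stripGoA, collatzV2Go, if_pos he, if_pos he,
        stripA_fuel k _ _ h2 (by omega) (by omega), cntA_fuel k _ _ _ h2 (by omega) (by omega)]
      rw [v2AltGo, dif_neg h, dif_pos he]
      have hrT : (r ≥ 0) = True := by simp [ge_iff_le, hr]
      simp only [hrT, if_true]
      exact ih _ _ _ _ h2 (by omega) (by omega)
    · rw [hj, stripGoA, collatzV2Go, if_neg he, if_neg he]

-- one full Syracuse step of B, for odd c ≠ 1 with budget left, equals A's append-and-advance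
theorem alt_step (b c : Int) (seq : List Int) :
    v2AltGo (b - 1) (3 * c + 1) 0 seq
      = v2AltGo (b - 1) (syracuse c) (-1) (seq ++ [collatz_v2 c]) := by
  have hm : (3 * c + 1) ≠ 0 := by omega
  simp only [syracuse, collatz_v2]
  rw [alt_strip_pos (3 * c + 1).natAbs _ _ _ _ hm le_rfl le_rfl]
  have hodd := stripA_odd (3 * c + 1).natAbs _ hm le_rfl
  have hv : 0 ≤ collatzV2Go (3 * c + 1).natAbs (3 * c + 1) 0 := cnt_nonneg _ _ _ le_rfl
  rw [alt_odd_pos _ _ _ _ hodd.1 hv, alt_odd_neg _ _ _ hodd.1]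

-- main loop correspondence
theorem main_go (f : Nat) : ∀ (b curr : Int) (seq : List Int), b.toNat = f → curr ≠ 0 →
    v2OrbitGo f seq curr = v2AltGo b curr (-1) seq := by
  induction f with
  | zero =>
    intro b curr seq hb h
    rw [v2OrbitGo, alt_strip_neg curr.natAbs _ _ _ h le_rfl]
    have hodd := stripA_odd curr.natAbs _ h le_rfl
    rw [alt_odd_neg _ _ _ hodd.1, if_pos (Or.inr (by omega))]
  | succ f ih =>
    intro b curr seq hb h
    have hbpos : b = (f : Int) + 1 := by omega
    rw [v2OrbitGo]
    by_cases h1 : curr = 1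
    · rw [if_pos h1, h1, alt_odd_neg _ _ _ (by rw [mod2_emod]; decide),
        if_pos (Or.inl rfl)]
    · rw [if_neg h1]
      by_cases he : PySem.Int.mod curr 2 = 0
      · rw [if_pos he]
        have hodd := stripA_odd curr.natAbs _ h le_rfl
        rw [alt_strip_neg curr.natAbs _ _ _ h le_rfl, alt_odd_neg _ _ _ hodd.1]
        by_cases hc1 : stripGoA curr.natAbs curr = 1
        · rw [if_pos hc1, if_pos (Or.inl hc1)]
        · rw [if_neg hc1,
            if_neg (fun hor => hor.elim (fun hh => hc1 hh) (fun hh => by omega)),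
            alt_step _ _ _]
          have hs := stripA_odd (3 * stripGoA curr.natAbs curr + 1).natAbs
            (3 * stripGoA curr.natAbs curr + 1) (by omega) le_rfl
          exact ih (b - 1) (syracuse _) _ (by omega) hs.2
      · rw [if_neg he, alt_odd_neg _ _ _ he,
          if_neg (fun hor => hor.elim (fun hh => h1 hh) (fun hh => by omega)),
          alt_step _ _ _]
        have hs := stripA_odd (3 * curr + 1).natAbs (3 * curr + 1) (by omega) le_rfl
        exact ih (b - 1) (syracuse _) _ (by omega) hs.2

-- ===== VERDICT (by name: the statement is the Claim_ definition above) =====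
theorem v2_orbit_spec : Claim_equal_v2_orbit := by
  intro n max_steps _ hpre
  show v2_orbit n max_steps = v2_orbit_alt n max_steps
  exact main_go max_steps.toNat max_steps n [] rfl hpre
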